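-- pv_equiv track=rewrite | github.com/sophie-spectacular/spectacular-atom-mapper | preprocess.py | decrease_indices_correctly
-- ===== SOURCE A (Python) =====
-- def decrease_indices_correctly(chem_list, removed_index):
--     updated_chem_list = []
--     for chem in chem_list:
--         updated_chem = ""
--         i = 0
--         while i < len(chem):
--             if chem[i] == ':' and i + 1 < len(chem) and chem[i+1].isdigit():
--                 # ':' 발견 후 숫자 시작 지점 찾기
--                 start = i + 1
--                 end = start
--                 while end < len(chem) and chem[end].isdigit():
--                     end += 1
--
--                 # 해당 인덱스 추출 및 조건에 따른 처리
--                 index = int(chem[start:end])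
--                 if index > removed_index:
--                     index -= 1  # 인덱스 감소
--                 updated_chem += chem[i:start] + str(index)
--                 i = end - 1
--             else:
--                 updated_chem += chem[i]
--             i += 1
--         updated_chem_list.append(updated_chem)
--     return updated_chem_list
-- ===== SOURCE B (Python) =====
-- def decrease_indices_correctly(chem_list, removed_index):
--     # Split each string on ':' once; every piece after a colon that starts with
--     # digits gets its leading number reparsed/decremented, then rejoin.
--     def fix(part):
--         j = 0
--         while j < len(part) and part[j].isdigit():
--             j += 1
--         if j == 0:
--             return part
--         n = int(part[:j])
--         if n > removed_index:
--             n -= 1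
--         return str(n) + part[j:]
--
--     out = []
--     for chem in chem_list:
--         parts = chem.split(':')
--         out.append(parts[0] + ''.join(':' + fix(p) for p in parts[1:]))
--     return out
-- ===== Notes on version B (the rewrite author's own statement) =====
-- stated objective: alternative
-- what changed: B splits each string on ':' and rewrites only the leading digit run of each post-colon piece, instead of A's character-by-character while loop with manual start/end index tracking.
import Mathlib
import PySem

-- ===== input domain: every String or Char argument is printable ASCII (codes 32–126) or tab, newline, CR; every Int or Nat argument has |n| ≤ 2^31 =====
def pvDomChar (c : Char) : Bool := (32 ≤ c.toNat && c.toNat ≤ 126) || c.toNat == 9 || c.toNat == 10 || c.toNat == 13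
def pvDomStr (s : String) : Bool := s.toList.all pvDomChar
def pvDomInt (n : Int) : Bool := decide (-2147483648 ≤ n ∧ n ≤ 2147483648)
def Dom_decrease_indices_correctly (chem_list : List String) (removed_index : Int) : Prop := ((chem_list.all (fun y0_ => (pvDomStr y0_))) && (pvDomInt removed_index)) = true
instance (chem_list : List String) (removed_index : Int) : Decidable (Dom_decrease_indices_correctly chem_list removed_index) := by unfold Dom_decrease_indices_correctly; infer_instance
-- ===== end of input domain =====

-- B restructures A: instead of A's char-by-char while loop with manual index
-- tracking, B splits each string on ':' and rewrites the leading digit run of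
-- each post-colon piece; same cost, different decomposition (objective: alternative).

-- shared builtin ports: str.isdigit on one ASCII char (exact on the domain),
-- int() on a nonempty all-digit string (exact there), str() via PySem.
def pvDigit (c : Char) : Bool := decide ('0' ≤ c ∧ c ≤ '9')
def pvParseDigits (ds : List Char) : Int := ds.foldl (fun a c => a * 10 + ((c.toNat : Int) - 48)) 0
def pvAdjust (removed_index n : Int) : Int := if n > removed_index then n - 1 else n

-- ===== PORT A =====
-- A's while loop over chem, as the obvious recursion on the remaining suffix:
-- a ':' followed by a digit consumes the whole digit run (chem[start:end]) and
-- resumes at i = end; otherwise one character is copied.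
def pvLoopA (removed_index : Int) : List Char → List Char
  | [] => []
  | c :: cs =>
    if c = ':' && (match cs.head? with | some d => pvDigit d | none => false) then
      ':' :: (PySem.Int.toChars (pvAdjust removed_index (pvParseDigits (cs.takeWhile pvDigit)))
              ++ pvLoopA removed_index (cs.dropWhile pvDigit))
    else c :: pvLoopA removed_index cs
  termination_by l => l.length
  decreasing_by
  · exact Nat.lt_succ_of_le (cs.length_dropWhile_le pvDigit)
  · simp

def decrease_indices_correctly (chem_list : List String) (removed_index : Int) : List String :=
  chem_list.map (fun chem => String.mk (pvLoopA removed_index chem.toList))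

-- ===== PORT B =====
-- hand port of Python's str.split(':') (single-char separator, keeps empty pieces); exact.
def pvSplitColon : List Char → List (List Char)
  | [] => [[]]
  | c :: cs =>
    if c = ':' then [] :: pvSplitColon cs
    else (c :: (pvSplitColon cs).headI) :: (pvSplitColon cs).tail

-- B's fix(part): rewrite the leading digit run, if any.
def pvFixPart (removed_index : Int) (p : List Char) : List Char :=
  let ds := p.takeWhile pvDigit
  if ds = [] then p
  else PySem.Int.toChars (pvAdjust removed_index (pvParseDigits ds)) ++ p.dropWhile pvDigit

def decrease_indices_correctly_alt (chem_list : List String) (removed_index : Int) : List String :=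
  chem_list.map (fun chem =>
    match pvSplitColon chem.toList with
    | [] => String.mk []  -- unreachable: split never returns []
    | h :: t => String.mk (h ++ t.flatMap (fun p => ':' :: pvFixPart removed_index p)))

-- ===== PRECONDITION & SPEC =====
def Spec_decrease_indices_correctly (chem_list : List String) (removed_index : Int) (out : List String) : Prop := out = decrease_indices_correctly_alt chem_list removed_index
instance (chem_list : List String) (removed_index : Int) (out : List String) : Decidable (Spec_decrease_indices_correctly chem_list removed_index out) := by unfold Spec_decrease_indices_correctly; infer_instance

-- ===== CLAIM (what is proved, stated in full; the proofs are below) =====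
def Claim_equal_decrease_indices_correctly : Prop := ∀ (chem_list : List String) (removed_index : Int), Dom_decrease_indices_correctly chem_list removed_index → Spec_decrease_indices_correctly chem_list removed_index (decrease_indices_correctly chem_list removed_index)

-- ===== LEMMAS AND PROOFS =====

def pvJoin (removed_index : Int) : List (List Char) → List Char
  | [] => []
  | h :: t => h ++ t.flatMap (fun p => ':' :: pvFixPart removed_index p)

lemma pvSplit_ne_nil (cs : List Char) : pvSplitColon cs ≠ [] := by
  cases cs <;> simp [pvSplitColon] <;> split <;> simp

-- prepending non-colon characters extends the first piece
lemma pvSplit_append (ds cs : List Char) (h : ∀ c ∈ ds, c ≠ ':') :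
    pvSplitColon (ds ++ cs) = (ds ++ (pvSplitColon cs).headI) :: (pvSplitColon cs).tail := by
  induction ds with
  | nil =>
      simp
      obtain ⟨a, t, he⟩ := List.exists_cons_of_ne_nil (pvSplit_ne_nil cs)
      simp [he]
  | cons d ds ih =>
      have hd : d ≠ ':' := h d (by simp)
      simp only [List.cons_append, pvSplitColon, if_neg hd,
        ih (fun c hc => h c (by simp [hc]))]
      simp

-- the first piece of the split of a suffix whose head is not a digit has no leading digits
lemma pvHead_no_digit (cs : List Char) (h : ∀ d ∈ cs.head?, pvDigit d = false) :
    ((pvSplitColon cs).headI).takeWhile pvDigit = [] := by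
  cases cs with
  | nil => simp [pvSplitColon]
  | cons c cs =>
      simp at h
      by_cases hc : c = ':'
      · simp [pvSplitColon, hc]
      · simp [pvSplitColon, hc, List.takeWhile_cons, h]

lemma pvTake_drop_pre (ds h : List Char) (hds : ∀ c ∈ ds, pvDigit c = true)
    (hh : h.takeWhile pvDigit = []) :
    (ds ++ h).takeWhile pvDigit = ds ∧ (ds ++ h).dropWhile pvDigit = h := by
  induction ds with
  | nil =>
      refine ⟨by simpa using hh, ?_⟩
      cases h with
      | nil => simp
      | cons a l =>
          have hp : pvDigit a = false := by
            by_cases hq : pvDigit a = true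
            · simp [List.takeWhile_cons, hq] at hh
            · simpa using hq
          simp [List.dropWhile_cons, hp]
  | cons d ds ih =>
      have hd : pvDigit d = true := hds d (by simp)
      have := ih (fun c hc => hds c (by simp [hc]))
      simp [List.takeWhile_cons, List.dropWhile_cons, hd, this.1, this.2]

lemma pvDigit_ne_colon (c : Char) (h : pvDigit c = true) : c ≠ ':' := by
  intro hc
  subst hc
  exact absurd h (by decide)

lemma pvDropWhile_head (l : List Char) : ∀ d ∈ (l.dropWhile pvDigit).head?, pvDigit d = false := by
  induction l with
  | nil => simp
  | cons a l ih =>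
      by_cases h : pvDigit a = true
      · simpa [List.dropWhile_cons, h] using ih
      · simp [h]

lemma pvFixPart_self (removed_index : Int) (p : List Char)
    (h : p.takeWhile pvDigit = []) : pvFixPart removed_index p = p := by
  simp [pvFixPart, h]

lemma pvFixPart_digits (removed_index : Int) (p : List Char)
    (h : p.takeWhile pvDigit ≠ []) :
    pvFixPart removed_index p =
      PySem.Int.toChars (pvAdjust removed_index (pvParseDigits (p.takeWhile pvDigit)))
        ++ p.dropWhile pvDigit := by
  simp only [pvFixPart, if_neg h]

lemma pvLoopA_eq (removed_index : Int) (cs : List Char) :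
    pvLoopA removed_index cs = pvJoin removed_index (pvSplitColon cs) := by
  fun_induction pvLoopA removed_index cs with
  | case1 => simp [pvSplitColon, pvJoin]
  | case2 c cs hcond ih =>
      -- c = ':' and cs starts with a digit
      simp only [Bool.and_eq_true, decide_eq_true_eq] at hcond
      obtain ⟨hc, hd⟩ := hcond
      subst hc
      have hds : ∀ x ∈ cs.takeWhile pvDigit, pvDigit x = true :=
        fun x hx => List.mem_takeWhile_imp hx
      have hcs : cs = cs.takeWhile pvDigit ++ cs.dropWhile pvDigit :=
        (List.takeWhile_append_dropWhile).symm
      have hne : cs.takeWhile pvDigit ≠ [] := by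
        cases cs with
        | nil => simp at hd
        | cons a cs2 =>
            simp at hd
            simp [List.takeWhile_cons, hd]
      obtain ⟨a, t, he⟩ := List.exists_cons_of_ne_nil (pvSplit_ne_nil (cs.dropWhile pvDigit))
      have hsplit : pvSplitColon cs = (cs.takeWhile pvDigit ++ a) :: t := by
        conv_lhs => rw [hcs]
        rw [pvSplit_append _ _ (fun x hx => pvDigit_ne_colon x (hds x hx)), he]
        simp
      have hhd : a.takeWhile pvDigit = [] := by
        have := pvHead_no_digit (cs.dropWhile pvDigit) (pvDropWhile_head cs)
        rwa [he] at this
      have htd := pvTake_drop_pre (cs.takeWhile pvDigit) a hds hhd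
      have hfix : pvFixPart removed_index (cs.takeWhile pvDigit ++ a) =
          PySem.Int.toChars (pvAdjust removed_index (pvParseDigits (cs.takeWhile pvDigit))) ++ a := by
        rw [pvFixPart_digits _ _ (by rw [htd.1]; exact hne), htd.1, htd.2]
      rw [ih, he]
      simp [pvSplitColon, hsplit, pvJoin, hfix]
  | case3 c cs hcond ih =>
      simp only [Bool.and_eq_true, decide_eq_true_eq, not_and] at hcond
      by_cases hc : c = ':'
      · subst hc
        have hd := hcond rfl
        have hrest : ∀ d ∈ cs.head?, pvDigit d = false := by
          intro d hdm
          cases cs with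
          | nil => simp at hdm
          | cons b cs2 =>
              simp at hdm hd
              exact hdm ▸ hd
        obtain ⟨a, t, he⟩ := List.exists_cons_of_ne_nil (pvSplit_ne_nil cs)
        have hhd : a.takeWhile pvDigit = [] := by
          have := pvHead_no_digit cs hrest
          rwa [he] at this
        rw [ih, he]
        simp [pvSplitColon, pvJoin, he, pvFixPart_self removed_index a hhd]
      · obtain ⟨a, t, he⟩ := List.exists_cons_of_ne_nil (pvSplit_ne_nil cs)
        rw [ih]
        simp [pvSplitColon, hc, pvJoin, he]

-- ===== VERDICT (by name: the statement is the Claim_ definition above) =====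
theorem decrease_indices_correctly_spec : Claim_equal_decrease_indices_correctly := by
  intro chem_list removed_index _
  unfold Spec_decrease_indices_correctly decrease_indices_correctly decrease_indices_correctly_alt
  refine List.map_congr_left (fun chem _ => ?_)
  obtain ⟨a, t, he⟩ := List.exists_cons_of_ne_nil (pvSplit_ne_nil chem.toList)
  rw [pvLoopA_eq, he, pvJoin]
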